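-- pv_equiv track=rewrite | github.com/abdullah-an2108536/Python-CMPS151-ProgrammingConcepts | Chapter 8 (Dictionaries)/ppt/ppt11.py | salary
-- ===== SOURCE A (Python) =====
-- def salary(dic):
--     keys=[]
--     for i in dic:
--         keys.append(i)
--     for i in keys:
--         if dic[i]>6000:
--             del dic[i]
--     return dic
-- ===== SOURCE B (Python) =====
-- def salary(dic):
--     kept = {k: v for k, v in dic.items() if v <= 6000}
--     dic.clear()
--     dic.update(kept)
--     return dic
-- ===== Notes on version B (the rewrite author's own statement) =====
-- stated objective: simpler
-- what changed: Replaces the copy-keys-then-delete loops with a single comprehension that keeps the entries with value <= 6000, then rebuilds the dict in place via clear()+update(), preserving in-place mutation and identity.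
import Mathlib
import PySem

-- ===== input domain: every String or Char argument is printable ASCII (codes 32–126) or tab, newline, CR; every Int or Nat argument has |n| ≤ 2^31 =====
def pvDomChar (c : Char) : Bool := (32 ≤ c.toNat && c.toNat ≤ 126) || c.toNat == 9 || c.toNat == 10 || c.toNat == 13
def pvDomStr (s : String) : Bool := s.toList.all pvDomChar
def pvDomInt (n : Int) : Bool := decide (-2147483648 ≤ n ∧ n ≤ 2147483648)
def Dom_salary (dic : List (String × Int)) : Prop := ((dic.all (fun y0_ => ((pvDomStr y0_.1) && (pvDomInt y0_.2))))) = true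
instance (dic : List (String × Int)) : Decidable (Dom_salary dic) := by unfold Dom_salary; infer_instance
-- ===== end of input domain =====

-- B rebuilds the dict from a keep-filter comprehension via clear()+update() instead of
-- A's copy-keys-then-delete loops (objective: simpler). Both Pythons mutate dic in place
-- and return it; the equivalence proved here is about the returned dict's contents.

-- ===== PORT A =====
-- body of A's second loop: 'if dic[i] > 6000: del dic[i]'
-- (the 'none' branch would be a KeyError; it is unreachable, since the keys were copied
--  from the dict itself and lookups never fail on them)
def salaryStep (d : PySem.Dict String Int) (k : String) : PySem.Dict String Int :=
  match d.get? k with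
  | some v => if v > 6000 then d.erase k else d
  | none => d

def salary (dic : List (String × Int)) : List (String × Int) :=
  let d := PySem.Dict.ofList dic
  let keys := d.keys.foldl (fun acc i => acc ++ [i]) []   -- keys=[]; for i in dic: keys.append(i)
  (keys.foldl salaryStep d).items

-- ===== PORT B =====
def salary_alt (dic : List (String × Int)) : List (String × Int) :=
  let d := PySem.Dict.ofList dic
  let kept := PySem.Dict.ofList (d.items.filter (fun p => p.2 ≤ 6000))  -- the comprehension
  (PySem.Dict.empty.update kept.items).items                            -- dic.clear(); dic.update(kept)

-- ===== PRECONDITION & SPEC =====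
def Spec_salary (dic : List (String × Int)) (out : List (String × Int)) : Prop := out = salary_alt dic
instance (dic : List (String × Int)) (out : List (String × Int)) : Decidable (Spec_salary dic out) := by unfold Spec_salary; infer_instance

-- ===== CLAIM (what is proved, stated in full; the proofs are below) =====
def Claim_equal_salary : Prop := ∀ (dic : List (String × Int)), Dom_salary dic → Spec_salary dic (salary dic)

-- ===== LEMMAS AND PROOFS =====

-- updating the empty dict with a nodup-keyed pair list just yields that list
lemma update_empty_items (L : List (String × Int)) (h : (L.map Prod.fst).Nodup) :
    (PySem.Dict.empty.update L : PySem.Dict String Int).items = L := by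
  have := PySem.Dict.items_foldl_insert_fresh (l := L) (d := (PySem.Dict.empty : PySem.Dict String Int))
      (k := Prod.fst) (v := Prod.snd) (by intro a _; simp [PySem.Dict.contains_empty]) h
  simpa [PySem.Dict.update] using this

lemma nodup_keys_erase (d : PySem.Dict String Int) (k : String) (h : d.keys.Nodup) :
    (d.erase k).keys.Nodup := by
  refine List.Sublist.nodup ?_ h
  exact List.Sublist.map _ List.filter_sublist

lemma loop_items (ks : List String) (d : PySem.Dict String Int) (h : d.keys.Nodup) :
    (ks.foldl salaryStep d).items
      = d.items.filter (fun p => !(decide (p.1 ∈ ks) && decide (p.2 > 6000))) := by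
  induction ks generalizing d with
  | nil => simp
  | cons k t ih =>
    simp only [List.foldl_cons]
    rcases hv : d.get? k with _ | v
    · have hk : k ∉ d.keys := (PySem.Dict.get?_eq_none_iff_not_mem_keys d k).mp hv
      have hstep : salaryStep d k = d := by simp [salaryStep, hv]
      rw [hstep, ih d h]
      refine List.filter_congr ?_
      intro p hp
      have hpk : p.1 ∈ d.keys := List.mem_map_of_mem hp
      have : p.1 ≠ k := fun e => hk (e ▸ hpk)
      simp [List.mem_cons, this]
    · by_cases hgt : v > 6000
      · have hstep : salaryStep d k = d.erase k := by simp [salaryStep, hv, hgt]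
        rw [hstep, ih _ (nodup_keys_erase d k h)]
        show (List.filter _ (d.items.filter (fun p => !(p.1 == k)))) = _
        rw [List.filter_filter]
        refine List.filter_congr ?_
        intro p hp
        by_cases hpk : p.1 = k
        · have : d.get? p.1 = some p.2 := PySem.Dict.get?_of_mem_items d (by simpa using hp) h
          rw [hpk, hv] at this
          have hval : p.2 = v := by injection this.symm
          simp [hpk, hval, hgt]
        · simp [hpk, List.mem_cons]
      · have hstep : salaryStep d k = d := by simp [salaryStep, hv, hgt]
        rw [hstep, ih d h]
        refine List.filter_congr ?_
        intro p hp
        by_cases hpk : p.1 = k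
        · have : d.get? p.1 = some p.2 := PySem.Dict.get?_of_mem_items d (by simpa using hp) h
          rw [hpk, hv] at this
          have hval : p.2 = v := by injection this.symm
          simp [hpk, hval, hgt]
        · simp [hpk, List.mem_cons]

-- ===== VERDICT (by name: the statement is the Claim_ definition above) =====
theorem salary_spec : Claim_equal_salary := by
  intro dic _
  unfold Spec_salary salary salary_alt
  show (let d := PySem.Dict.ofList dic;
      let keys := d.keys.foldl (fun acc i => acc ++ [i]) [];
      (keys.foldl salaryStep d).items)
    = (let d := PySem.Dict.ofList dic;
      let kept := PySem.Dict.ofList (d.items.filter (fun p => p.2 ≤ 6000));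
      (PySem.Dict.empty.update kept.items).items)
  simp only []
  set d := PySem.Dict.ofList dic with hd
  have hnd : d.keys.Nodup := PySem.Dict.nodup_keys_ofList dic
  -- A's first loop just copies the key list
  have hcopy : d.keys.foldl (fun acc i => acc ++ [i]) [] = d.keys := by
    simpa using PySem.List.foldl_append_singleton d.keys ([] : List String)
  rw [hcopy, loop_items d.keys d hnd]
  -- A's result is the keep-filter of the items
  have hA : d.items.filter (fun p => !(decide (p.1 ∈ d.keys) && decide (p.2 > 6000)))
      = d.items.filter (fun p => decide (p.2 ≤ 6000)) := by
    refine List.filter_congr ?_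
    intro p hp
    have hk : p.1 ∈ d.keys := List.mem_map_of_mem hp
    rcases le_or_gt p.2 6000 with h6 | h6
    · simp [hk, h6, not_lt.mpr h6]
    · simp [hk, h6, not_le.mpr h6]
  rw [hA]
  -- B's clear+update of the nodup-keyed kept dict yields the same list
  have hkeptnd : ((d.items.filter (fun p => p.2 ≤ 6000)).map Prod.fst).Nodup :=
    List.Sublist.nodup (List.Sublist.map _ List.filter_sublist) hnd
  have hkept : (PySem.Dict.ofList (d.items.filter (fun p => p.2 ≤ 6000))).items
      = d.items.filter (fun p => p.2 ≤ 6000) := by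
    rw [PySem.Dict.ofList]; exact update_empty_items _ hkeptnd
  rw [hkept]
  exact (update_empty_items _ hkeptnd).symm
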